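-- pv_equiv track=rewrite | github.com/Tigge/advent-of-code-2015 | day_5.py | badwords_1
-- ===== SOURCE A (Python) =====
-- def badwords_1(inp):
--     VOWELS = "aeiou"
--     double = False
--     vowels = 0
--     for x in range(len(inp)):
--         tup = inp[x:x + 2]
--         if len(tup) == 2:
--             if tup in ["ab", "cd", "pq", "xy"]:
--                 return False
--             elif tup[0] == tup[1]:
--                 double = True
--         if tup[0] in VOWELS:
--             vowels += 1
--
--     return vowels >= 3 and double
-- ===== SOURCE B (Python) =====
-- def badwords_1(inp):
--     forbidden = any(p in inp for p in ("ab", "cd", "pq", "xy"))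
--     double = any(a == b for a, b in zip(inp, inp[1:]))
--     vowels = sum(c in "aeiou" for c in inp)
--     return not forbidden and vowels >= 3 and double
-- ===== Notes on version B (the rewrite author's own statement) =====
-- stated objective: simpler
-- what changed: Replaces A's single fused index loop (slicing inp[x:x+2] at every position with an early return and two pieces of accumulated state) by three independent stateless passes: a substring search for the four forbidden digraphs, an adjacent-pair zip scan for a double letter, and a vowel count, combined in one final boolean expression.
import Mathlib
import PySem

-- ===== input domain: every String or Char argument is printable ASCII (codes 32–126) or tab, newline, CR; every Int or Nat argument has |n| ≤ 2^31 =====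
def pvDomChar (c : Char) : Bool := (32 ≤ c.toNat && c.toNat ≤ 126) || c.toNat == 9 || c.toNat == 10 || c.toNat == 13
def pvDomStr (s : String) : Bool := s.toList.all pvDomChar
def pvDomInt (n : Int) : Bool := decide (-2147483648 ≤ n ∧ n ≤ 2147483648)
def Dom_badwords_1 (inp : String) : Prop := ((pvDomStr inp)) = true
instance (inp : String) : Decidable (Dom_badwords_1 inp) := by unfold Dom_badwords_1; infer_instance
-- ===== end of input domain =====

-- B replaces A's single fused index loop with three independent passes (substring
-- search for forbidden pairs, an adjacent-pair scan, a vowel count); objective: simpler.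

-- ===== PORT A =====
-- the fused index loop: for x in range(len(inp)), tup = inp[x:x+2], early 'return False'
def badwords_1_go (s : List Char) (x : Nat) (double : Bool) (vowels : Int) : Bool :=
  if x < s.length then
    let tup := PySem.List.slice s (some (x : Int)) (some ((x : Int) + 2))
    match tup with
    | c1 :: c2 :: _ =>                                -- len(tup) == 2
        if ["ab".toList, "cd".toList, "pq".toList, "xy".toList].contains tup then
          false                                       -- return False
        else
          let double := if c1 == c2 then true else double
          let vowels := if "aeiou".toList.contains c1 then vowels + 1 else vowels
          badwords_1_go s (x + 1) double vowels
    | [c] =>                                          -- len(tup) == 1: only the vowel test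
        badwords_1_go s (x + 1) double
          (if "aeiou".toList.contains c then vowels + 1 else vowels)
    | [] => badwords_1_go s (x + 1) double vowels     -- unreachable (x < len inp)
  else
    decide (vowels ≥ 3) && double
termination_by s.length - x

def badwords_1 (inp : String) : Bool := badwords_1_go inp.toList 0 false 0

-- ===== PORT B =====
def badwords_1_alt (inp : String) : Bool :=
  let forbidden := ["ab", "cd", "pq", "xy"].any (fun p => PySem.Str.isIn p inp)
  let s := inp.toList
  let double := (s.zip (PySem.List.slice s (some 1) none)).any (fun ab => ab.1 == ab.2)
  let vowels : Int := (s.map (fun c => if "aeiou".toList.contains c then (1 : Int) else 0)).sum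
  !forbidden && decide (vowels ≥ 3) && double

-- ===== PRECONDITION & SPEC =====
def Spec_badwords_1 (inp : String) (out : Bool) : Prop := out = badwords_1_alt inp
instance (inp : String) (out : Bool) : Decidable (Spec_badwords_1 inp out) := by unfold Spec_badwords_1; infer_instance

-- ===== CLAIM (what is proved, stated in full; the proofs are below) =====
def Claim_equal_badwords_1 : Prop := ∀ (inp : String), Dom_badwords_1 inp → Spec_badwords_1 inp (badwords_1 inp)

-- ===== LEMMAS AND PROOFS =====

def pvIsBadPair (ab : Char × Char) : Bool :=
  ["ab".toList, "cd".toList, "pq".toList, "xy".toList].contains [ab.1, ab.2]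

def pvVowel (c : Char) : Bool := "aeiou".toList.contains c

-- the value A's loop returns, as a function of the yet-unread suffix and the state
def pvSpecFrom (l : List Char) (d : Bool) (v : Int) : Bool :=
  if (l.zip (l.drop 1)).any pvIsBadPair then false
  else
    decide (v + (l.countP (fun c => pvVowel c) : Int) ≥ 3) &&
      (d || (l.zip (l.drop 1)).any (fun ab => ab.1 == ab.2))

theorem pvSpecFrom_nil (d : Bool) (v : Int) : pvSpecFrom [] d v = (decide (v ≥ 3) && d) := by
  simp [pvSpecFrom]

theorem pvSpecFrom_one (c : Char) (d : Bool) (v : Int) :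
    pvSpecFrom [c] d v = (decide ((if pvVowel c then v + 1 else v) ≥ 3) && d) := by
  simp only [pvSpecFrom, List.drop_succ_cons, List.drop_nil, List.zip_nil_right,
    List.any_nil, Bool.false_eq_true, if_false, Bool.or_false, List.countP_cons,
    List.countP_nil]
  congr 1
  rw [decide_eq_decide]
  split_ifs <;> push_cast <;> omega

theorem pvSpecFrom_two (c1 c2 : Char) (t : List Char) (d : Bool) (v : Int) :
    pvSpecFrom (c1 :: c2 :: t) d v =
      if pvIsBadPair (c1, c2) then false
      else pvSpecFrom (c2 :: t) (if c1 == c2 then true else d)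
             (if pvVowel c1 then v + 1 else v) := by
  by_cases hb : pvIsBadPair (c1, c2) = true
  · simp [pvSpecFrom, hb]
  · simp only [Bool.not_eq_true] at hb
    rw [if_neg (by simp [hb])]
    simp only [pvSpecFrom, List.drop_succ_cons, List.drop_zero, List.zip_cons_cons,
      List.any_cons, hb, Bool.false_or, List.countP_cons]
    cases hany : ((c2 :: t).zip t).any pvIsBadPair
    · simp only [Bool.false_eq_true, if_false]
      congr 1
      · rw [decide_eq_decide]
        split_ifs <;> push_cast <;> omega
      · cases d <;> cases hc : (c1 == c2) <;> simp
    · simp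

theorem pvDropTwo {s : List Char} {x : Nat} {c1 c2 : Char} {rest : List Char}
    (ht : (s.drop x).take 2 = c1 :: c2 :: rest) :
    s.drop x = c1 :: c2 :: s.drop (x + 2) ∧ rest = [] ∧ s.drop (x + 1) = c2 :: s.drop (x + 2) := by
  cases hd : s.drop x with
  | nil => rw [hd] at ht; simp at ht
  | cons a u =>
    cases u with
    | nil => rw [hd] at ht; simp at ht
    | cons b w =>
      rw [hd] at ht
      simp only [List.take_succ_cons, List.take_zero, List.cons.injEq] at ht
      obtain ⟨ha, hb, hr⟩ := ht
      have hw : s.drop (x + 2) = w := by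
        rw [← List.drop_drop, hd]; rfl
      have h1 : s.drop (x + 1) = b :: w := by
        rw [← List.drop_drop, hd]; rfl
      refine ⟨?_, hr.symm, ?_⟩
      · rw [hw, ha, hb]
      · rw [h1, hw, hb]

theorem pvDropOne {s : List Char} {x : Nat} {c : Char}
    (ht : (s.drop x).take 2 = [c]) :
    s.drop x = [c] ∧ s.drop (x + 1) = [] := by
  cases hd : s.drop x with
  | nil => rw [hd] at ht; simp at ht
  | cons a u =>
    cases u with
    | cons b w => rw [hd] at ht; simp at ht
    | nil =>
      rw [hd] at ht
      simp only [List.take_succ_cons, List.take_nil, List.cons.injEq] at ht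
      have h1 : s.drop (x + 1) = [] := by
        rw [← List.drop_drop, hd]; rfl
      exact ⟨by rw [ht.1], h1⟩

set_option maxRecDepth 4096 in
theorem badwords_1_go_spec (s : List Char) (x : Nat) (d : Bool) (v : Int) :
    badwords_1_go s x d v = pvSpecFrom (s.drop x) d v := by
  fun_induction badwords_1_go s x d v with
  | case1 x d v hlt tup c1 c2 rest htup hmem =>
      have etup : tup = (s.drop x).take 2 := by
        show PySem.List.slice s (some (x : Int)) (some ((x : Int) + 2)) = _
        have e : ((x : Int) + 2) = ((x + 2 : Nat) : Int) := by push_cast; ring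
        rw [e, PySem.List.slice_natCast]
        congr 1
        omega
      have ht : (s.drop x).take 2 = c1 :: c2 :: rest := by rw [← etup, htup]
      obtain ⟨h2, hrest, -⟩ := pvDropTwo ht
      rw [htup, hrest] at hmem
      have hbp : pvIsBadPair (c1, c2) = true := hmem
      rw [h2, pvSpecFrom_two, if_pos hbp]
  | case2 x d v hlt tup c1 c2 rest htup hmem d' v' ih =>
      have etup : tup = (s.drop x).take 2 := by
        show PySem.List.slice s (some (x : Int)) (some ((x : Int) + 2)) = _
        have e : ((x : Int) + 2) = ((x + 2 : Nat) : Int) := by push_cast; ring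
        rw [e, PySem.List.slice_natCast]
        congr 1
        omega
      have ht : (s.drop x).take 2 = c1 :: c2 :: rest := by rw [← etup, htup]
      obtain ⟨h2, hrest, hdrop⟩ := pvDropTwo ht
      rw [htup, hrest] at hmem
      have hbp : ¬ pvIsBadPair (c1, c2) = true := hmem
      rw [h2, pvSpecFrom_two, if_neg hbp]
      rw [ih, hdrop]
      rfl
  | case3 x d v hlt tup c htup ih =>
      have etup : tup = (s.drop x).take 2 := by
        show PySem.List.slice s (some (x : Int)) (some ((x : Int) + 2)) = _
        have e : ((x : Int) + 2) = ((x + 2 : Nat) : Int) := by push_cast; ring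
        rw [e, PySem.List.slice_natCast]
        congr 1
        omega
      have ht : (s.drop x).take 2 = [c] := by rw [← etup, htup]
      obtain ⟨h1, hdrop⟩ := pvDropOne ht
      simp only [dite_eq_ite] at ih ⊢
      rw [ih, hdrop, h1, pvSpecFrom_nil, pvSpecFrom_one]
      rfl
  | case4 x d v hlt tup htup =>
      exfalso
      have etup : tup = (s.drop x).take 2 := by
        show PySem.List.slice s (some (x : Int)) (some ((x : Int) + 2)) = _
        have e : ((x : Int) + 2) = ((x + 2 : Nat) : Int) := by push_cast; ring
        rw [e, PySem.List.slice_natCast]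
        congr 1
        omega
      have ht : (s.drop x).take 2 = [] := by rw [← etup, htup]
      have hnil : s.drop x = [] := by
        cases hd : s.drop x with
        | nil => rfl
        | cons a u => rw [hd] at ht; simp at ht
      have := List.drop_eq_nil_iff.mp hnil
      omega
  | case5 x d v hge =>
      have : s.drop x = [] := List.drop_eq_nil_of_le (by omega)
      rw [this, pvSpecFrom_nil]

-- substring membership of a two-character pattern is an adjacent-pair scan
theorem pvIsIn_pair (a b : Char) (l : List Char) :
    PySem.Chars.isIn [a, b] l = (l.zip (l.drop 1)).any (fun p => p.1 == a && p.2 == b) := by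
  rw [Bool.eq_iff_iff]
  simp only [PySem.Chars.isIn_iff_infix, List.any_eq_true]
  induction l with
  | nil => simp
  | cons c t ih =>
    rw [List.infix_cons_iff]
    cases t with
    | nil =>
      constructor
      · rintro (h | h)
        · rcases h with ⟨u, hu⟩
          simp at hu
        · have := h.length_le
          simp at this
      · rintro ⟨p, hp, -⟩
        simp at hp
    | cons c2 w =>
      simp only [List.drop_succ_cons, List.drop_zero, List.zip_cons_cons, List.mem_cons] at *
      constructor
      · rintro (h | h)
        · rcases h with ⟨u, hu⟩
          simp only [List.cons_append, List.cons.injEq] at hu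
          exact ⟨(c, c2), Or.inl rfl, by simp [hu.1, hu.2.1]⟩
        · obtain ⟨p, hp, hpe⟩ := ih.mp h
          exact ⟨p, Or.inr hp, hpe⟩
      · rintro ⟨p, hp | hp, hpe⟩
        · left
          simp only [hp] at hpe
          simp only [Bool.and_eq_true, beq_iff_eq] at hpe
          exact ⟨w, by simp [hpe.1, hpe.2]⟩
        · right
          exact ih.mpr ⟨p, hp, hpe⟩

theorem pvAny_or {α : Type} (l : List α) (p q : α → Bool) :
    l.any (fun x => p x || q x) = (l.any p || l.any q) := by
  induction l with
  | nil => rfl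
  | cons a t ih =>
    simp only [List.any_cons, ih]
    cases p a <;> cases q a <;> cases t.any p <;> cases t.any q <;> rfl

theorem pvForb_eq (l : List Char) :
    (["ab", "cd", "pq", "xy"].any fun p => PySem.Chars.isIn p.toList l) =
      (l.zip (l.drop 1)).any pvIsBadPair := by
  have hab : "ab".toList = ['a', 'b'] := rfl
  have hcd : "cd".toList = ['c', 'd'] := rfl
  have hpq : "pq".toList = ['p', 'q'] := rfl
  have hxy : "xy".toList = ['x', 'y'] := rfl
  simp only [List.any_cons, List.any_nil, Bool.or_false, hab, hcd, hpq, hxy, pvIsIn_pair]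
  rw [← pvAny_or, ← pvAny_or, ← pvAny_or]
  congr 1
  funext p
  cases p with
  | mk a b =>
    simp only [pvIsBadPair, List.contains_cons, List.contains_nil, hab, hcd, hpq, hxy]
    simp only [List.cons_beq_cons, Bool.or_false]
    simp

-- ===== VERDICT (by name: the statement is the Claim_ definition above) =====
theorem badwords_1_spec : Claim_equal_badwords_1 := by
  intro inp _
  unfold Spec_badwords_1
  rw [badwords_1, badwords_1_go_spec, List.drop_zero]
  unfold badwords_1_alt pvSpecFrom
  simp only [PySem.Str.isIn_eq, pvForb_eq, PySem.List.slice_from_one, List.drop_one,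
    PySem.List.sum_map_ite_one_zero]
  have hcp : List.countP (fun c => pvVowel c) inp.toList
      = List.countP ['a', 'e', 'i', 'o', 'u'].contains inp.toList := by
    apply List.countP_congr
    intro c _
    simp [pvVowel]
  rw [hcp]
  cases hforb : (inp.toList.zip inp.toList.tail).any pvIsBadPair
  · simp
  · simp
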